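-- pv_equiv track=rewrite | github.com/ivanillera/TP1Sintaxis | numeros.py | a_num
-- ===== SOURCE A (Python) =====
-- TRAMPA = -1
--
-- RESULTADO_ACEPTADO = "ACEPTADO"
--
-- RESULTADO_TRAMPA = "TRAMPA"
--
-- RESULTADO_NO_ACEPTADO = "NO_ACEPTADO"
--
-- digits = ["0", "1", "2", "3", "4", "5", "6", "7", "8", "9"]
--
-- def d_num(estado_anterior, caracter):
--     if estado_anterior == 0 and caracter in digits:
--         return 1
--     if estado_anterior == 1 and caracter in digits:
--         return 1
--     if estado_anterior == 1 and caracter == ".":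
--         return 2
--     if estado_anterior == 2 and caracter in digits:
--         return 3
--     if estado_anterior == 3 and caracter in digits:
--         return 3
--
--
--     return TRAMPA
--
-- def a_num(cadena):
--     Finales = [1, 3]
--     estado_actual = 0
--
--     for caracter in cadena:
--         estado_proximo = d_num(estado_actual, caracter)
--         if estado_proximo == TRAMPA:
--             return RESULTADO_TRAMPA
--         estado_actual = estado_proximo
--
--     if estado_actual in Finales:
--         return RESULTADO_ACEPTADO
--     else:
--         return RESULTADO_NO_ACEPTADO
-- ===== SOURCE B (Python) =====
-- RESULTADO_ACEPTADO = "ACEPTADO"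
--
-- RESULTADO_TRAMPA = "TRAMPA"
--
-- RESULTADO_NO_ACEPTADO = "NO_ACEPTADO"
--
-- def a_num(cadena):
--     partes = cadena.split(".")
--     if len(partes) == 1:
--         entero = partes[0]
--         if entero.isdigit():
--             return RESULTADO_ACEPTADO
--         if entero == "":
--             return RESULTADO_NO_ACEPTADO
--         return RESULTADO_TRAMPA
--     if len(partes) == 2:
--         entero, frac = partes
--         if entero.isdigit() and frac.isdigit():
--             return RESULTADO_ACEPTADO
--         if entero.isdigit() and frac == "":
--             return RESULTADO_NO_ACEPTADO
--         return RESULTADO_TRAMPA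
--     return RESULTADO_TRAMPA
-- ===== Notes on version B (the rewrite author's own statement) =====
-- stated objective: idiomatic
-- what changed: Replaces the explicit DFA state/transition loop with an idiomatic decomposition: the string is split at the decimal point into at most two parts, which are classified with str.isdigit checks.
import Mathlib
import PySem

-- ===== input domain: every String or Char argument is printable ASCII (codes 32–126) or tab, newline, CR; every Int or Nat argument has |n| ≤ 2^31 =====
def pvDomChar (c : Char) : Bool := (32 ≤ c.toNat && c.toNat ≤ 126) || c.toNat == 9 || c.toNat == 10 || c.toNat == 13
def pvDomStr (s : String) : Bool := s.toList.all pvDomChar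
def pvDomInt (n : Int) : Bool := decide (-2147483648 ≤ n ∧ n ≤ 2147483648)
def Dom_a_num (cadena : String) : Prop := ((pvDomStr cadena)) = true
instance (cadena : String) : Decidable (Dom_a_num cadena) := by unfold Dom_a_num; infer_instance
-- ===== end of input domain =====

-- B replaces A's explicit DFA state/transition loop by an idiomatic split-at-the-decimal-point classification; same outputs.

-- ===== PORT A =====
def pvDigits : List Char := ['0', '1', '2', '3', '4', '5', '6', '7', '8', '9']

def dNum (estado_anterior : Int) (caracter : Char) : Int :=
  if estado_anterior = 0 ∧ caracter ∈ pvDigits then 1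
  else if estado_anterior = 1 ∧ caracter ∈ pvDigits then 1
  else if estado_anterior = 1 ∧ caracter = '.' then 2
  else if estado_anterior = 2 ∧ caracter ∈ pvDigits then 3
  else if estado_anterior = 3 ∧ caracter ∈ pvDigits then 3
  else -1

def aLoop : Int → List Char → String
  | estado, [] => if estado ∈ ([1, 3] : List Int) then "ACEPTADO" else "NO_ACEPTADO"
  | estado, c :: cs =>
      if dNum estado c = -1 then "TRAMPA" else aLoop (dNum estado c) cs

def a_num (cadena : String) : String := aLoop 0 cadena.toList

-- ===== PORT B =====
def a_num_alt (cadena : String) : String :=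
  let partes := PySem.Chars.splitOn cadena.toList ['.']
  if partes.length = 1 then
    let entero := partes.headI
    if PySem.Chars.strIsdigit entero then "ACEPTADO"
    else if entero = [] then "NO_ACEPTADO"
    else "TRAMPA"
  else if partes.length = 2 then
    match partes with
    | [entero, frac] =>
        if PySem.Chars.strIsdigit entero && PySem.Chars.strIsdigit frac then "ACEPTADO"
        else if PySem.Chars.strIsdigit entero && frac = [] then "NO_ACEPTADO"
        else "TRAMPA"
    | _ => "TRAMPA"
  else "TRAMPA"

-- ===== PRECONDITION & SPEC =====
def Spec_a_num (cadena : String) (out : String) : Prop := out = a_num_alt cadena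
instance (cadena : String) (out : String) : Decidable (Spec_a_num cadena out) := by unfold Spec_a_num; infer_instance

-- ===== CLAIM (what is proved, stated in full; the proofs are below) =====
def Claim_equal_a_num : Prop := ∀ (cadena : String), Dom_a_num cadena → Spec_a_num cadena (a_num cadena)

-- ===== LEMMAS AND PROOFS =====

/-- Splitting a char list at '.' (reference recursion used by the proofs). -/
def mySplit : List Char → List (List Char)
  | [] => [[]]
  | c :: rest => if c = '.' then [] :: mySplit rest else (mySplit rest).modifyHead (c :: ·)

theorem length_mySplit (l : List Char) : (mySplit l).length = l.count '.' + 1 := by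
  induction l with
  | nil => simp [mySplit]
  | cons c rest ih =>
      by_cases hc : c = '.'
      · simp [mySplit, hc, ih]
      · simp [mySplit, hc, ih]

theorem mySplit_ne_nil (l : List Char) : mySplit l ≠ [] := by
  intro h
  have := length_mySplit l
  rw [h] at this
  simp at this

theorem mySplit_cons' (l : List Char) : ∃ p ps, mySplit l = p :: ps := by
  cases hmn : mySplit l with
  | nil => exact absurd hmn (mySplit_ne_nil l)
  | cons p ps => exact ⟨p, ps, rfl⟩

theorem mySplit_singleton (cs : List Char) (q : List Char) (h : mySplit cs = [q]) : q = cs := by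
  induction cs generalizing q with
  | nil => simpa [mySplit] using h.symm
  | cons d ds ih =>
      by_cases hd : d = '.'
      · rw [mySplit, if_pos hd] at h
        simp at h
        exact absurd h.2 (mySplit_ne_nil ds)
      · rw [mySplit, if_neg hd] at h
        obtain ⟨p, ps, hp⟩ := mySplit_cons' ds
        rw [hp] at h
        simp only [List.modifyHead] at h
        injection h with h1 h2
        subst h2
        obtain rfl : p = ds := ih p hp
        exact h1.symm

theorem goEq (l : List Char) : ∀ (fuel : Nat) (cur : List Char) (acc : List (List Char)),
    l.length < fuel →
    PySem.Chars.splitOn.go ['.'] fuel l cur acc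
      = acc.reverse ++ (mySplit l).modifyHead (cur.reverse ++ ·) := by
  induction l with
  | nil =>
      intro fuel cur acc h
      obtain ⟨f, rfl⟩ : ∃ f, fuel = f + 1 := ⟨fuel - 1, by omega⟩
      simp [PySem.Chars.splitOn.go, mySplit]
  | cons c rest ih =>
      intro fuel cur acc h
      obtain ⟨f, rfl⟩ : ∃ f, fuel = f + 1 := ⟨fuel - 1, by omega⟩
      by_cases hc : c = '.'
      · subst hc
        have hpre : List.isPrefixOf ['.'] ('.' :: rest) = true := by simp [List.isPrefixOf]
        simp only [PySem.Chars.splitOn.go, hpre, if_pos]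
        rw [show List.drop (['.'] : List Char).length ('.' :: rest) = rest from rfl]
        rw [ih f [] ((cur.reverse) :: acc) (by simpa using h)]
        simp [mySplit]
        obtain ⟨p, ps, hp⟩ := mySplit_cons' rest
        rw [hp]
        simp [List.modifyHead]
      · have hpre : List.isPrefixOf ['.'] (c :: rest) = false := by
          simp [List.isPrefixOf]; exact fun hh => (hc hh.symm).elim
        simp only [PySem.Chars.splitOn.go, hpre, Bool.false_eq_true, if_neg, not_false_iff]
        rw [ih f (c :: cur) acc (by simpa using h)]
        obtain ⟨p, ps, hp⟩ := mySplit_cons' rest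
        have hms : mySplit (c :: rest) = (mySplit rest).modifyHead (c :: ·) := by
          simp [mySplit, hc]
        rw [hms, hp]
        simp [List.modifyHead]

theorem splitOn_eq_mySplit (l : List Char) : PySem.Chars.splitOn l ['.'] = mySplit l := by
  have hgo := goEq l (l.length + 1) [] [] (by omega)
  obtain ⟨p, ps, hp⟩ := mySplit_cons' l
  rw [PySem.Chars.splitOn, hgo, hp]
  simp only [List.reverse_nil, List.nil_append, List.modifyHead]

theorem mem_pvDigits_iff (c : Char) : (c ∈ pvDigits) ↔ PySem.Chars.isdigit c = true := by
  constructor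
  · intro h
    simp only [pvDigits, List.mem_cons, List.not_mem_nil, or_false] at h
    rcases h with rfl | rfl | rfl | rfl | rfl | rfl | rfl | rfl | rfl | rfl <;> decide
  · intro h
    simp only [PySem.Chars.isdigit, Bool.and_eq_true, decide_eq_true_eq] at h
    obtain ⟨h0, h9⟩ := h
    rw [Char.le_def] at h0 h9
    have h1 : 48 ≤ c.toNat ∧ c.toNat ≤ 57 :=
      ⟨UInt32.le_iff_toNat_le.mp h0, UInt32.le_iff_toNat_le.mp h9⟩
    have h2 : c.toNat = 48 ∨ c.toNat = 49 ∨ c.toNat = 50 ∨ c.toNat = 51 ∨ c.toNat = 52 ∨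
        c.toNat = 53 ∨ c.toNat = 54 ∨ c.toNat = 55 ∨ c.toNat = 56 ∨ c.toNat = 57 := by omega
    have hofnat : c = Char.ofNat c.toNat := by
      simp [Char.ofNat_toNat]
    rcases h2 with h2 | h2 | h2 | h2 | h2 | h2 | h2 | h2 | h2 | h2 <;>
      · rw [hofnat, h2]; decide

theorem aLoop_cons (st : Int) (c : Char) (cs : List Char) :
    aLoop st (c :: cs) = if dNum st c = -1 then "TRAMPA" else aLoop (dNum st c) cs := rfl

theorem dNum_0_dig {c : Char} (hd : c ∈ pvDigits) : dNum 0 c = 1 := by simp [dNum, hd]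
theorem dNum_0_not {c : Char} (hm : c ∉ pvDigits) : dNum 0 c = -1 := by simp [dNum, hm]
theorem dNum_1_dig {c : Char} (hd : c ∈ pvDigits) : dNum 1 c = 1 := by simp [dNum, hd]
theorem dNum_1_dot : dNum 1 '.' = 2 := by decide
theorem dNum_1_not {c : Char} (hm : c ∉ pvDigits) (hc : c ≠ '.') : dNum 1 c = -1 := by
  simp [dNum, hm, hc]
theorem dNum_2_dig {c : Char} (hd : c ∈ pvDigits) : dNum 2 c = 3 := by simp [dNum, hd]
theorem dNum_2_not {c : Char} (hm : c ∉ pvDigits) : dNum 2 c = -1 := by simp [dNum, hm]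
theorem dNum_3_dig {c : Char} (hd : c ∈ pvDigits) : dNum 3 c = 3 := by simp [dNum, hd]
theorem dNum_3_not {c : Char} (hm : c ∉ pvDigits) : dNum 3 c = -1 := by simp [dNum, hm]

theorem aLoop3 (l : List Char) :
    aLoop 3 l = if l.all PySem.Chars.isdigit then "ACEPTADO" else "TRAMPA" := by
  induction l with
  | nil => norm_num [aLoop]
  | cons c cs ih =>
      by_cases hd : PySem.Chars.isdigit c
      · rw [aLoop_cons, dNum_3_dig ((mem_pvDigits_iff c).2 hd)]
        norm_num
        rw [ih]
        simp [hd]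
      · rw [aLoop_cons, dNum_3_not (fun hh => hd ((mem_pvDigits_iff c).1 hh))]
        norm_num
        simp [hd]

theorem aLoop2 (l : List Char) :
    aLoop 2 l = if l = [] then "NO_ACEPTADO"
      else if l.all PySem.Chars.isdigit then "ACEPTADO" else "TRAMPA" := by
  cases l with
  | nil => norm_num [aLoop]
  | cons c cs =>
      by_cases hd : PySem.Chars.isdigit c
      · rw [aLoop_cons, dNum_2_dig ((mem_pvDigits_iff c).2 hd)]
        norm_num
        rw [aLoop3]
        simp [hd]
      · rw [aLoop_cons, dNum_2_not (fun hh => hd ((mem_pvDigits_iff c).1 hh))]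
        norm_num
        simp [hd]

/-- B's classification, read off the split parts (the shape `a_num_alt` computes). -/
def bOf : List (List Char) → String
  | [p] => if PySem.Chars.strIsdigit p then "ACEPTADO"
           else if p = [] then "NO_ACEPTADO" else "TRAMPA"
  | [p, q] => if PySem.Chars.strIsdigit p && PySem.Chars.strIsdigit q then "ACEPTADO"
              else if PySem.Chars.strIsdigit p && q = [] then "NO_ACEPTADO" else "TRAMPA"
  | _ => "TRAMPA"

/-- The state-1 variant of `bOf` (a nonempty digit prefix already consumed). -/
def bOf1 : List (List Char) → String
  | [p] => if p.all PySem.Chars.isdigit then "ACEPTADO" else "TRAMPA"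
  | [p, q] => if p.all PySem.Chars.isdigit then
                (if PySem.Chars.strIsdigit q then "ACEPTADO"
                 else if q = [] then "NO_ACEPTADO" else "TRAMPA")
              else "TRAMPA"
  | _ => "TRAMPA"

theorem bOf1_cons_digit (c : Char) (hd : PySem.Chars.isdigit c = true)
    (ps : List (List Char)) : bOf1 (ps.modifyHead (c :: ·)) = bOf1 ps := by
  match ps with
  | [] => rfl
  | [p] => simp [bOf1, List.modifyHead, hd]
  | [p, q] => simp [bOf1, List.modifyHead, hd]
  | p :: q :: r :: rs => rfl

theorem bOf1_cons_nondigit (c : Char) (hd : PySem.Chars.isdigit c = false)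
    (ps : List (List Char)) : bOf1 (ps.modifyHead (c :: ·)) = "TRAMPA" := by
  match ps with
  | [] => rfl
  | [p] => simp [bOf1, List.modifyHead, hd]
  | [p, q] => simp [bOf1, List.modifyHead, hd]
  | p :: q :: r :: rs => rfl

theorem bOf_cons_digit (c : Char) (hd : PySem.Chars.isdigit c = true)
    (ps : List (List Char)) : bOf (ps.modifyHead (c :: ·)) = bOf1 ps := by
  match ps with
  | [] => rfl
  | [p] =>
      simp only [List.modifyHead, bOf, bOf1, PySem.Chars.strIsdigit, List.isEmpty_cons,
        Bool.not_false, Bool.true_and, List.all_cons, hd]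
      split_ifs <;> simp_all
  | [p, q] =>
      simp only [List.modifyHead, bOf, bOf1, PySem.Chars.strIsdigit, List.isEmpty_cons,
        Bool.not_false, Bool.true_and, List.all_cons, hd]
      split_ifs <;> simp_all
  | p :: q :: r :: rs => rfl

theorem bOf_cons_nondigit (c : Char) (hd : PySem.Chars.isdigit c = false)
    (ps : List (List Char)) : bOf (ps.modifyHead (c :: ·)) = "TRAMPA" := by
  match ps with
  | [] => rfl
  | [p] => simp [bOf, List.modifyHead, PySem.Chars.strIsdigit, hd]
  | [p, q] => simp [bOf, List.modifyHead, PySem.Chars.strIsdigit, hd]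
  | p :: q :: r :: rs => rfl

theorem bOf_nil_cons (ps : List (List Char)) (h : ps ≠ []) : bOf ([] :: ps) = "TRAMPA" := by
  match ps with
  | [] => exact absurd rfl h
  | [q] => simp [bOf, PySem.Chars.strIsdigit]
  | q :: r :: rs => rfl

theorem aLoop1 (l : List Char) : aLoop 1 l = bOf1 (mySplit l) := by
  induction l with
  | nil => norm_num [aLoop, mySplit, bOf1]
  | cons c cs ih =>
      by_cases hc : c = '.'
      · subst hc
        rw [aLoop_cons, dNum_1_dot]
        norm_num
        rw [aLoop2]
        obtain ⟨q, rs, hsp⟩ := mySplit_cons' cs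
        rcases rs with _ | ⟨r, rs'⟩
        · -- exactly one part: the whole of cs; the state-2 run matches the [[], q] branch
          have hq := mySplit_singleton cs q hsp
          simp only [mySplit, hsp, hq]
          by_cases hq0 : cs = []
          · simp [hq0, bOf1, PySem.Chars.strIsdigit]
          · by_cases hall : cs.all PySem.Chars.isdigit <;>
              simp [hq0, hall, bOf1, PySem.Chars.strIsdigit]
        · -- at least two parts: cs contains a '.', so from state 2 the run dies
          have hcount : 1 ≤ cs.count '.' := by
            have hl := length_mySplit cs
            rw [hsp] at hl
            simp at hl
            omega
          have hmem : ('.' : Char) ∈ cs := List.count_pos_iff.mp (by omega)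
          have hne : cs ≠ [] := by rintro rfl; simp at hmem
          have hnall : ¬ (cs.all PySem.Chars.isdigit = true) := by
            intro hall
            have := List.all_eq_true.mp hall _ hmem
            simp [PySem.Chars.isdigit] at this
          simp only [mySplit, hsp]
          rcases rs' with _ | _ <;> simp [bOf1, hne, hnall]
      · by_cases hd : PySem.Chars.isdigit c
        · rw [aLoop_cons, dNum_1_dig ((mem_pvDigits_iff c).2 hd)]
          norm_num
          rw [ih]
          have hms : mySplit (c :: cs) = (mySplit cs).modifyHead (c :: ·) := by
            simp [mySplit, hc]
          rw [hms, bOf1_cons_digit c hd]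
        · rw [aLoop_cons, dNum_1_not (fun hh => hd ((mem_pvDigits_iff c).1 hh)) hc]
          norm_num
          have hms : mySplit (c :: cs) = (mySplit cs).modifyHead (c :: ·) := by
            simp [mySplit, hc]
          rw [hms, bOf1_cons_nondigit c (by simpa using hd)]

theorem aLoop0 (l : List Char) : aLoop 0 l = bOf (mySplit l) := by
  cases l with
  | nil => norm_num [aLoop, mySplit, bOf, PySem.Chars.strIsdigit]
  | cons c cs =>
      by_cases hd : PySem.Chars.isdigit c
      · have hc : c ≠ '.' := by rintro rfl; simp [PySem.Chars.isdigit] at hd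
        rw [aLoop_cons, dNum_0_dig ((mem_pvDigits_iff c).2 hd)]
        norm_num
        rw [aLoop1]
        have hms : mySplit (c :: cs) = (mySplit cs).modifyHead (c :: ·) := by
          simp [mySplit, hc]
        rw [hms, bOf_cons_digit c hd]
      · rw [aLoop_cons, dNum_0_not (fun hh => hd ((mem_pvDigits_iff c).1 hh))]
        norm_num
        by_cases hc : c = '.'
        · subst hc
          have hms : mySplit ('.' :: cs) = [] :: mySplit cs := by simp [mySplit]
          rw [hms, bOf_nil_cons _ (mySplit_ne_nil cs)]
        · have hms : mySplit (c :: cs) = (mySplit cs).modifyHead (c :: ·) := by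
            simp [mySplit, hc]
          rw [hms, bOf_cons_nondigit c (by simpa using hd)]

theorem alt_eq_bOf (cadena : String) : a_num_alt cadena = bOf (mySplit cadena.toList) := by
  unfold a_num_alt
  rw [splitOn_eq_mySplit]
  obtain ⟨p, rs, hsp⟩ := mySplit_cons' cadena.toList
  rcases rs with _ | ⟨q, rs'⟩
  · simp only [hsp]
    rfl
  · rcases rs' with _ | _
    · simp only [hsp]
      rfl
    · simp only [hsp]
      simp [bOf]

-- ===== VERDICT (by name: the statement is the Claim_ definition above) =====
theorem a_num_spec : Claim_equal_a_num := by
  intro cadena _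
  unfold Spec_a_num
  rw [alt_eq_bOf, a_num, aLoop0]
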